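-- pv_equiv track=rewrite | github.com/Masha212121/Homework | пр6 №3.py | can_isolate_blocks
-- ===== SOURCE A (Python) =====
-- def can_isolate_blocks(N, M, K):
--     for i in range(1, N):
--         if i * M == K or (N - i) * M == K:
--             return True
--     for j in range(1, M):
--         if N * j == K or N * (M - j) == K:
--             return True
--     return False
-- ===== SOURCE B (Python) =====
-- def can_isolate_blocks(N, M, K):
--     def hit(m, n):
--         # exists i in [1, n-1] with i*m == K ?
--         if m == 0:
--             return K == 0 and n >= 2
--         return K % m == 0 and 1 <= K // m <= n - 1
--     return hit(M, N) or hit(N, M)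
-- ===== Notes on version B (the rewrite author's own statement) =====
-- stated objective: faster
-- what changed: Replaces the two O(N)+O(M) scan loops with an O(1) divisibility check: a horizontal cut exists iff M divides K with quotient in [1,N-1], a vertical one iff N divides K with quotient in [1,M-1] (zero divisor handled as K==0 with the other side >= 2).
import Mathlib
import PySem

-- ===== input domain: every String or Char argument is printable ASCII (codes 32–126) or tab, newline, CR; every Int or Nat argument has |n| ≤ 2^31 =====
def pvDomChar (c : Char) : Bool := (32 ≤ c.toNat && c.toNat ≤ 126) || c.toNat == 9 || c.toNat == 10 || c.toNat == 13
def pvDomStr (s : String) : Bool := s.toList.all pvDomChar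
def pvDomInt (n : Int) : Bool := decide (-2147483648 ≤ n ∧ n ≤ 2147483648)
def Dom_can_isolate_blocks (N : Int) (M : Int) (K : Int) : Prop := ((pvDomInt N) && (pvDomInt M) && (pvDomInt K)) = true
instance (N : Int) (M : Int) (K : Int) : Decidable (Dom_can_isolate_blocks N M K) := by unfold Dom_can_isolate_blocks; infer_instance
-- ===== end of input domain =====

-- B replaces A's two linear scans by an O(1) divisibility check (same return value everywhere).

-- ===== PORT A =====
-- for i in range(1, N): if i*M == K or (N-i)*M == K: return True
-- for j in range(1, M): if N*j == K or N*(M-j) == K: return True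
-- return False
def can_isolate_blocks (N : Int) (M : Int) (K : Int) : Bool :=
  if (PySem.List.pyRange 1 N 1).any (fun i => i * M == K || (N - i) * M == K) then true
  else if (PySem.List.pyRange 1 M 1).any (fun j => N * j == K || N * (M - j) == K) then true
  else false

-- ===== PORT B =====
-- hit(m, n): exists i in [1, n-1] with i*m == K ?
def pvHit (K : Int) (m : Int) (n : Int) : Bool :=
  if m == 0 then decide (K = 0 ∧ n ≥ 2)
  else PySem.Int.mod K m == 0 &&
       (1 ≤ PySem.Int.floordiv K m && PySem.Int.floordiv K m ≤ n - 1)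

def can_isolate_blocks_alt (N : Int) (M : Int) (K : Int) : Bool :=
  pvHit K M N || pvHit K N M

-- ===== PRECONDITION & SPEC =====
def Spec_can_isolate_blocks (N : Int) (M : Int) (K : Int) (out : Bool) : Prop := out = can_isolate_blocks_alt N M K
instance (N : Int) (M : Int) (K : Int) (out : Bool) : Decidable (Spec_can_isolate_blocks N M K out) := by unfold Spec_can_isolate_blocks; infer_instance

-- ===== CLAIM (what is proved, stated in full; the proofs are below) =====
def Claim_equal_can_isolate_blocks : Prop := ∀ (N : Int) (M : Int) (K : Int), Dom_can_isolate_blocks N M K → Spec_can_isolate_blocks N M K (can_isolate_blocks N M K)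

-- ===== LEMMAS AND PROOFS =====

-- the closed-form hit test characterises "some i in [1,n-1] has i*m = K"
lemma pvHit_iff (K m n : Int) :
    pvHit K m n = true ↔ ∃ i : Int, 1 ≤ i ∧ i < n ∧ i * m = K := by
  unfold pvHit
  by_cases hm : m = 0
  · simp only [hm, beq_self_eq_true, if_true, decide_eq_true_eq]
    constructor
    · rintro ⟨hK, hn⟩; exact ⟨1, le_refl _, by omega, by simp [hK]⟩
    · rintro ⟨i, h1, h2, h3⟩
      constructor
      · simpa using h3.symm
      · omega
  · simp only [beq_iff_eq, hm, if_false, Bool.and_eq_true, decide_eq_true_eq]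
    constructor
    · rintro ⟨hmod, h1, h2⟩
      refine ⟨PySem.Int.floordiv K m, h1, by omega, ?_⟩
      have h := PySem.Int.floordiv_mul_add_mod K m
      rw [hmod] at h
      omega
    · rintro ⟨i, h1, h2, h3⟩
      have hmod : PySem.Int.mod K m = 0 := by
        rw [PySem.Int.mod_eq_zero_iff_dvd]
        exact ⟨i, by rw [← h3, mul_comm]⟩
      have h := PySem.Int.floordiv_mul_add_mod K m
      rw [hmod] at h
      have hq : PySem.Int.floordiv K m = i := by
        have : PySem.Int.floordiv K m * m = i * m := by omega
        exact mul_right_cancel₀ hm this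
      exact ⟨hmod, by omega, by omega⟩

-- a Python 'for i in range(1,n): if p(i): return True' scan as an existential
lemma any_range_iff (n : Int) (p : Int → Bool) :
    (PySem.List.pyRange 1 n 1).any p = true ↔ ∃ i : Int, 1 ≤ i ∧ i < n ∧ p i = true := by
  simp only [List.any_eq_true, PySem.List.mem_pyRange_one]
  constructor
  · rintro ⟨i, ⟨h1, h2⟩, h3⟩; exact ⟨i, h1, h2, h3⟩
  · rintro ⟨i, h1, h2, h3⟩; exact ⟨i, ⟨h1, h2⟩, h3⟩

-- the symmetric second disjunct of A's tests is redundant (i ↦ n - i)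
lemma scan_iff (n m K : Int) :
    (∃ i : Int, 1 ≤ i ∧ i < n ∧ (i * m = K ∨ (n - i) * m = K)) ↔
    (∃ i : Int, 1 ≤ i ∧ i < n ∧ i * m = K) := by
  constructor
  · rintro ⟨i, h1, h2, h3 | h3⟩
    · exact ⟨i, h1, h2, h3⟩
    · exact ⟨n - i, by omega, by omega, h3⟩
  · rintro ⟨i, h1, h2, h3⟩; exact ⟨i, h1, h2, Or.inl h3⟩

lemma main_eq (N M K : Int) : can_isolate_blocks N M K = can_isolate_blocks_alt N M K := by
  rw [Bool.eq_iff_iff]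
  unfold can_isolate_blocks can_isolate_blocks_alt
  constructor
  · intro h
    split_ifs at h with h1 h2
    · rw [Bool.or_eq_true]
      left
      rw [pvHit_iff]
      rw [any_range_iff] at h1
      rw [← scan_iff N M K]
      obtain ⟨i, hi1, hi2, hi3⟩ := h1
      simp only [Bool.or_eq_true, beq_iff_eq] at hi3
      exact ⟨i, hi1, hi2, hi3⟩
    · rw [Bool.or_eq_true]
      right
      rw [pvHit_iff]
      rw [any_range_iff] at h2
      rw [← scan_iff M N K]
      obtain ⟨j, hj1, hj2, hj3⟩ := h2
      simp only [Bool.or_eq_true, beq_iff_eq] at hj3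
      exact ⟨j, hj1, hj2, by rcases hj3 with h | h <;> [left; right] <;> (rw [mul_comm] at h; exact h)⟩
  · intro h
    rcases Bool.or_eq_true .. |>.mp h with h | h
    · rw [pvHit_iff, ← scan_iff N M K] at h
      obtain ⟨i, h1, h2, h3⟩ := h
      have : (PySem.List.pyRange 1 N 1).any (fun i => i * M == K || (N - i) * M == K) = true := by
        rw [any_range_iff]
        exact ⟨i, h1, h2, by simpa using h3⟩
      simp [this]
    · rw [pvHit_iff, ← scan_iff M N K] at h
      obtain ⟨j, h1, h2, h3⟩ := h
      have : (PySem.List.pyRange 1 M 1).any (fun j => N * j == K || N * (M - j) == K) = true := by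
        rw [any_range_iff]
        refine ⟨j, h1, h2, ?_⟩
        simp only [Bool.or_eq_true, beq_iff_eq]
        rcases h3 with h | h <;> [left; right] <;> (rw [mul_comm] at h; exact h)
      split_ifs <;> simp_all

-- ===== VERDICT (by name: the statement is the Claim_ definition above) =====
theorem can_isolate_blocks_spec : Claim_equal_can_isolate_blocks := by
  intro N M K _
  unfold Spec_can_isolate_blocks
  exact main_eq N M K
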